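-- pv_equiv track=rewrite | github.com/skapeyi/andela-labs | 4_data_structures/solution.py | manipulate_data
-- ===== SOURCE A (Python) =====
-- def manipulate_data(list_item):
-- 	if not isinstance(list_item, list):
-- 		raise ValueError('Only lists allowed')
--
-- 	positive_sum = 0
-- 	negative_sum = 0
-- 	result = []
--
-- 	for item in list_item:
-- 		if not isinstance(item,int):
-- 			raise ValueError("Only integers can be summed")
--
-- 		if item >= 0:
-- 			positive_sum += 1
--
-- 		if item < 0:
-- 			negative_sum += item
--
-- 	result.append(positive_sum)
-- 	result.append(negative_sum)
-- 	return result
-- ===== SOURCE B (Python) =====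
-- def manipulate_data(list_item):
--     if not isinstance(list_item, list):
--         raise ValueError('Only lists allowed')
--     for x in list_item:
--         if not isinstance(x, int):
--             raise ValueError("Only integers can be summed")
--     s = sorted(list_item)
--     neg_sum = 0
--     k = 0
--     while k < len(s) and s[k] < 0:
--         neg_sum += s[k]
--         k += 1
--     return [len(s) - k, neg_sum]
-- ===== Notes on version B (the rewrite author's own statement) =====
-- stated objective: alternative
-- what changed: B sorts the list and then scans only the negative prefix of the sorted list (stopping at the first non-negative element), deriving the non-negative count as len - prefix length, instead of A's single fused loop with two conditional accumulators.
import Mathlib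
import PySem

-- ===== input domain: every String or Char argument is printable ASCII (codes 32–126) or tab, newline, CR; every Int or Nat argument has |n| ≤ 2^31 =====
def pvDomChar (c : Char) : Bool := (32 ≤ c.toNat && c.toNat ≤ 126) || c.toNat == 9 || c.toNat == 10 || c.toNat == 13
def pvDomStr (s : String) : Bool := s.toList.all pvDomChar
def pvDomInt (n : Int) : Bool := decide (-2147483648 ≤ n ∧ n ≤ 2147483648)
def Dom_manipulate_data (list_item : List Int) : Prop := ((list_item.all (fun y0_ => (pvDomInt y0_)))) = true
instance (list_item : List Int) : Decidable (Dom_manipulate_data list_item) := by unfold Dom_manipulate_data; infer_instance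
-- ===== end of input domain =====

-- B sorts the list and scans only the negative prefix (count = len - prefix length); A is one fused loop. Equal return values; objective: alternative.
-- ===== PORT A =====
-- Port of A: one loop carrying (positive_sum, negative_sum), then result built by appends.
def manipulate_data (list_item : List Int) : List Int :=
  let acc := list_item.foldl (fun (st : Int × Int) item =>
    let st := if item ≥ 0 then (st.1 + 1, st.2) else st
    let st := if item < 0 then (st.1, st.2 + item) else st
    st) (0, 0)
  [acc.1, acc.2]

-- ===== PORT B =====
-- Port of B's while loop: consume the sorted list while the head is negative, accumulating (neg_sum, k).
def mdNegScan (s : List Int) (neg : Int) (k : Int) : Int × Int :=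
  match s with
  | [] => (neg, k)
  | x :: t => if x < 0 then mdNegScan t (neg + x) (k + 1) else (neg, k)

-- Port of B: sort, scan the negative prefix, return [len - k, neg_sum].
def manipulate_data_alt (list_item : List Int) : List Int :=
  let s := PySem.List.sorted list_item (fun x => x) false
  let r := mdNegScan s 0 0
  [(s.length : Int) - r.2, r.1]

-- ===== PRECONDITION & SPEC =====
def Spec_manipulate_data (list_item : List Int) (out : List Int) : Prop := out = manipulate_data_alt list_item
instance (list_item : List Int) (out : List Int) : Decidable (Spec_manipulate_data list_item out) := by unfold Spec_manipulate_data; infer_instance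

-- ===== CLAIM =====
def Claim_equal_manipulate_data : Prop := ∀ (list_item : List Int), Dom_manipulate_data list_item → Spec_manipulate_data list_item (manipulate_data list_item)

-- ===== LEMMAS AND PROOFS =====
-- A's fold computes (count of non-negatives, sum of negatives).
theorem md_fold (l : List Int) (a b : Int) :
    l.foldl (fun (st : Int × Int) item =>
      let st := if item ≥ 0 then (st.1 + 1, st.2) else st
      let st := if item < 0 then (st.1, st.2 + item) else st
      st) (a, b)
    = (a + ((l.filter (fun x => x ≥ 0)).length : Int),
       b + (l.filter (fun x => x < 0)).sum) := by
  induction l generalizing a b with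
  | nil => simp
  | cons h t ih =>
    by_cases hh : h ≥ 0
    · have hn : ¬ h < 0 := by omega
      simp [List.filter, hh, hn, ih]; ring
    · have hn : h < 0 := by omega
      simp [List.filter, hh, hn, ih]; ring

-- On a ≤-sorted list the negative-prefix scan yields the sum and count of ALL negatives.
theorem mdNegScan_sorted (s : List Int) (hs : s.Pairwise (· ≤ ·)) (neg k : Int) :
    mdNegScan s neg k
      = (neg + (s.filter (fun x => x < 0)).sum,
         k + ((s.filter (fun x => x < 0)).length : Int)) := by
  induction s generalizing neg k with
  | nil => simp [mdNegScan]
  | cons x t ih =>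
    rcases List.pairwise_cons.mp hs with ⟨hx, ht⟩
    by_cases hneg : x < 0
    · simp [mdNegScan, hneg, List.filter, ih ht, Prod.ext_iff]
      constructor <;> ring
    · have hfil : t.filter (fun x => x < 0) = [] := by
        rw [List.filter_eq_nil_iff]
        intro y hy
        have := hx y hy
        simp; omega
      simp [mdNegScan, hneg, List.filter, hfil]

theorem md_split (l : List Int) :
    (l.filter (fun x => x ≥ 0)).length + (l.filter (fun x => x < 0)).length = l.length := by
  induction l with
  | nil => simp
  | cons h t ih =>
    by_cases hh : h ≥ 0
    · have hn : ¬ h < 0 := by omega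
      simp [List.filter, hh, hn, ge_iff_le] at ih ⊢; omega
    · have hn : h < 0 := by omega
      simp [List.filter, hh, hn, ge_iff_le] at ih ⊢; omega

theorem md_filter_perm (l : List Int) (p : Int → Bool) :
    ((PySem.List.sorted l (fun x => x) false).filter p).Perm (l.filter p) :=
  (PySem.List.sorted_perm l (fun x => x) false).filter p

-- ===== VERDICT =====
theorem manipulate_data_spec : Claim_equal_manipulate_data := by
  intro l _
  show manipulate_data l = manipulate_data_alt l
  have hperm := PySem.List.sorted_perm l (fun x => x) false
  have hlt := md_filter_perm l (fun x => x < 0)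
  have hge := md_filter_perm l (fun x => x ≥ 0)
  have hsum : ((PySem.List.sorted l (fun x => x) false).filter (fun x => x < 0)).sum
      = (l.filter (fun x => x < 0)).sum := hlt.sum_eq
  have hlenlt : ((PySem.List.sorted l (fun x => x) false).filter (fun x => x < 0)).length
      = (l.filter (fun x => x < 0)).length := hlt.length_eq
  have hlen : (PySem.List.sorted l (fun x => x) false).length = l.length :=
    hperm.length_eq
  have hsplit := md_split l
  simp only [manipulate_data, manipulate_data_alt, md_fold,
    mdNegScan_sorted _ (PySem.List.sorted_pairwise l (fun x => x)) 0 0,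
    hsum, hlenlt, hlen]
  simp only [List.cons.injEq, zero_add, and_true]
  omega
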